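-- pv_equiv track=rewrite | github.com/AvivYaniv/Natural-Language-Processing | nlp-hw3/Code/q1-4/memm.py | build_tag_to_idx_dict
-- ===== SOURCE A (Python) =====
-- def build_tag_to_idx_dict(train_sentences):
--     curr_tag_index = 0
--     tag_to_idx_dict = {}
--     for train_sent in train_sentences:
--         for token in train_sent:
--             tag = token[1]
--             if tag not in tag_to_idx_dict:
--                 tag_to_idx_dict[tag] = curr_tag_index
--                 curr_tag_index += 1
--
--     tag_to_idx_dict['*'] = curr_tag_index
--     return tag_to_idx_dict
-- ===== SOURCE B (Python) =====
-- def build_tag_to_idx_dict(train_sentences):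
--     flat = [token[1] for sent in train_sentences for token in sent]
--     tags = sorted(set(flat), key=flat.index)
--     d = {t: i for i, t in enumerate(tags)}
--     d['*'] = len(d)
--     return d
-- ===== Notes on version B (the rewrite author's own statement) =====
-- stated objective: alternative
-- what changed: Instead of one incremental counter-and-membership pass, B flattens the tags, takes their set, and recovers the index order by SORTING the distinct tags by first-occurrence position (flat.index), then assigns indices by enumeration.
import Mathlib
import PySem

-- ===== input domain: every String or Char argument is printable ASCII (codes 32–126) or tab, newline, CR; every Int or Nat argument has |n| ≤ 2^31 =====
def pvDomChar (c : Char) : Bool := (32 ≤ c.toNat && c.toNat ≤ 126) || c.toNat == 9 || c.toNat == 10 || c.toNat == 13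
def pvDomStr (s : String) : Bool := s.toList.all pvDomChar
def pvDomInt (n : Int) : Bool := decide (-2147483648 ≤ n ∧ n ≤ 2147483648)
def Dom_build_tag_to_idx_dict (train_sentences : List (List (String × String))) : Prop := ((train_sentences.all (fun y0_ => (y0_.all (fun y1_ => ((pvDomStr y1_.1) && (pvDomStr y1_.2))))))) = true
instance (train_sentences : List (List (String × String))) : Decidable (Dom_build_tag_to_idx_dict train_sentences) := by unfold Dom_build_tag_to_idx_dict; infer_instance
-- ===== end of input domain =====

-- B replaces A's incremental counter-and-membership pass by a different algorithm:
-- flatten the tags, take their set, SORT the distinct tags by first-occurrence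
-- position (flat.index), then assign indices by enumeration (objective: alternative).

-- ===== PORT A =====
def build_tag_to_idx_dict (train_sentences : List (List (String × String))) : List (String × Int) :=
  let st := train_sentences.foldl
    (fun (st : PySem.Dict String Int × Int) train_sent =>
      train_sent.foldl
        (fun st token =>
          if st.1.contains token.2 then st
          else (st.1.insert token.2 st.2, st.2 + 1)) st)
    (PySem.Dict.empty, 0)
  (st.1.insert "*" st.2).items

-- ===== PORT B =====
-- key = flat.index t; every t in set(flat) occurs in flat, so Python never raises and the
-- '.getD 0' default is never taken (exact on all sorted elements).
def build_tag_to_idx_dict_alt (train_sentences : List (List (String × String))) : List (String × Int) :=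
  let flat := train_sentences.flatMap (fun sent => sent.map (fun token => token.2))
  let tags := PySem.List.sorted (PySem.Set.ofList flat)
      (fun t => (((PySem.List.index? flat t).getD 0 : Nat) : Int)) false
  let d := PySem.Dict.ofList ((PySem.List.enumerate tags 0).map (fun p => (p.2, p.1)))
  ((d.insert "*" (d.size : Int))).items

-- ===== PRECONDITION & SPEC =====
def Spec_build_tag_to_idx_dict (train_sentences : List (List (String × String))) (out : List (String × Int)) : Prop := out = build_tag_to_idx_dict_alt train_sentences
instance (train_sentences : List (List (String × String))) (out : List (String × Int)) : Decidable (Spec_build_tag_to_idx_dict train_sentences out) := by unfold Spec_build_tag_to_idx_dict; infer_instance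

-- ===== CLAIM (what is proved, stated in full; the proofs are below) =====
def Claim_equal_build_tag_to_idx_dict : Prop := ∀ (train_sentences : List (List (String × String))), Dom_build_tag_to_idx_dict train_sentences → Spec_build_tag_to_idx_dict train_sentences (build_tag_to_idx_dict train_sentences)

-- ===== LEMMAS AND PROOFS =====

-- first-occurrence index of t in l (the B port's sort key)
def pvIdx (l : List String) (t : String) : Int := (((PySem.List.index? l t).getD 0 : Nat) : Int)

-- recursive characterisation of ordered dedup (first occurrences in order)
def pvF : List String → List String
  | [] => []
  | x :: t => x :: (pvF t).filter (fun y => y != x)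

theorem pvF_subset (l : List String) (y : String) (h : y ∈ pvF l) : y ∈ l := by
  induction l with
  | nil => cases h
  | cons x t ih =>
    rcases h with _ | h
    · exact List.mem_cons_self
    · exact List.mem_cons_of_mem _ (ih (List.mem_of_mem_filter (by assumption)))

theorem pvUpdate_eq (t : List String) (s : List String) :
    PySem.Set.update s t = s ++ (pvF t).filter (fun y => !s.contains y) := by
  induction t generalizing s with
  | nil => simp [PySem.Set.update, pvF]
  | cons x t ih =>
    rw [PySem.Set.update_cons, pvF]
    by_cases h : x ∈ s
    · rw [PySem.Set.add_of_mem h, ih s]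
      have hx0 : (!s.contains x) = false := by simpa using h
      simp only [List.filter_cons, hx0, Bool.false_eq_true, if_false, List.filter_filter]
      congr 1
      apply List.filter_congr
      intro y hy
      by_cases hyx : y = x
      · subst hyx; simp [h]
      · simp [hyx]
    · rw [PySem.Set.add_of_not_mem h, ih (s ++ [x])]
      have hx1 : (!s.contains x) = true := by simpa using h
      simp only [List.filter_cons, hx1, if_true, List.filter_filter, List.append_assoc,
                 List.singleton_append]
      congr 2
      apply List.filter_congr
      intro y hy
      by_cases hyx : y = x
      · subst hyx; simp
      · simp [hyx, List.mem_append]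

theorem pvOfList_eq_pvF (l : List String) : PySem.Set.ofList l = pvF l := by
  have : PySem.Set.ofList l = PySem.Set.update [] l := rfl
  rw [this, pvUpdate_eq]
  simp

theorem pvF_pairwise (l : List String) :
    (pvF l).Pairwise (fun a b => pvIdx l a < pvIdx l b) := by
  induction l with
  | nil => exact List.Pairwise.nil
  | cons x t ih =>
    rw [pvF]
    constructor
    · intro y hy
      have hyx : y ≠ x := by
        have := List.of_mem_filter hy; simpa using this
      have hyt : y ∈ t := pvF_subset t y (List.mem_of_mem_filter hy)
      obtain ⟨k, hk⟩ := Option.isSome_iff_exists.mp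
        ((PySem.List.index?_isSome_iff t y).2 hyt)
      have h1 : pvIdx (x :: t) x = 0 := by
        rw [pvIdx, PySem.List.index?_cons_self]; rfl
      have h2 : pvIdx (x :: t) y = (k : Int) + 1 := by
        rw [pvIdx, PySem.List.index?_cons_of_ne t (Ne.symm hyx), hk]; rfl
      rw [h1, h2]; omega
    · have hf : (pvF t).Pairwise (fun a b => pvIdx t a < pvIdx t b) := ih
      have := hf.filter (fun y => y != x)
      refine this.imp_of_mem ?_
      intro a b ha hb hab
      have hax : a ≠ x := by have := List.of_mem_filter ha; simpa using this
      have hbx : b ≠ x := by have := List.of_mem_filter hb; simpa using this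
      have hat : a ∈ t := pvF_subset t a (List.mem_of_mem_filter ha)
      have hbt : b ∈ t := pvF_subset t b (List.mem_of_mem_filter hb)
      obtain ⟨ka, hka⟩ := Option.isSome_iff_exists.mp
        ((PySem.List.index?_isSome_iff t a).2 hat)
      obtain ⟨kb, hkb⟩ := Option.isSome_iff_exists.mp
        ((PySem.List.index?_isSome_iff t b).2 hbt)
      have hta : pvIdx t a = (ka : Int) := by rw [pvIdx, hka]; rfl
      have htb : pvIdx t b = (kb : Int) := by rw [pvIdx, hkb]; rfl
      have hpa : pvIdx (x :: t) a = (ka : Int) + 1 := by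
        rw [pvIdx, PySem.List.index?_cons_of_ne t (Ne.symm hax), hka]; rfl
      have hpb : pvIdx (x :: t) b = (kb : Int) + 1 := by
        rw [pvIdx, PySem.List.index?_cons_of_ne t (Ne.symm hbx), hkb]; rfl
      rw [hta, htb] at hab
      rw [hpa, hpb]; omega

-- the B port's sort reproduces first-occurrence order
theorem pvSorted_eq (l : List String) :
    PySem.List.sorted (PySem.Set.ofList l) (fun t => pvIdx l t) false = PySem.Set.ofList l := by
  apply PySem.List.sorted_eq_of_perm_of_pairwise_lt
  · exact List.Perm.refl _
  · rw [pvOfList_eq_pvF]; exact pvF_pairwise l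

-- the dict that maps the i-th element of s to index i
def pvIdxDict (s : List String) : PySem.Dict String Int :=
  PySem.Dict.mk ((PySem.List.enumerate s 0).map (fun p => (p.2, p.1)))

theorem pvIdxDict_keys (s : List String) : (pvIdxDict s).keys = s := by
  simp [pvIdxDict, PySem.Dict.keys, List.map_map, Function.comp_def,
        PySem.List.map_snd_enumerate]

theorem pvIdxDict_contains (s : List String) (t : String) :
    (pvIdxDict s).contains t = decide (t ∈ s) := by
  rw [PySem.Dict.contains_eq_decide_mem_keys, pvIdxDict_keys]

theorem pvIdxDict_insert (s : List String) (t : String) (h : t ∉ s) :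
    (pvIdxDict s).insert t (s.length : Int) = pvIdxDict (s ++ [t]) := by
  apply PySem.Dict.ext
  rw [PySem.Dict.items_insert_of_not_contains]
  · simp [pvIdxDict, PySem.List.enumerate_append, PySem.List.enumerate]
  · rw [pvIdxDict_contains]; simpa using h

-- A's loop body over tags
def pvStep (st : PySem.Dict String Int × Int) (t : String) : PySem.Dict String Int × Int :=
  if st.1.contains t then st else (st.1.insert t st.2, st.2 + 1)

theorem pvLoop (xs : List String) (s : List String) :
    xs.foldl pvStep (pvIdxDict s, (s.length : Int))
      = (pvIdxDict (PySem.Set.update s xs), (((PySem.Set.update s xs : List String).length : Int))) := by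
  induction xs generalizing s with
  | nil => simp [PySem.Set.update]
  | cons t xs ih =>
    rw [PySem.Set.update_cons, List.foldl_cons]
    by_cases h : t ∈ s
    · rw [PySem.Set.add_of_mem h]
      simpa [pvStep, pvIdxDict_contains, h] using ih s
    · rw [PySem.Set.add_of_not_mem h]
      have : pvStep (pvIdxDict s, (s.length : Int)) t
          = (pvIdxDict (s ++ [t]), ((s ++ [t]).length : Int)) := by
        simp [pvStep, pvIdxDict_contains, h, pvIdxDict_insert s t h]
      rw [this]; exact ih (s ++ [t])

-- the nested fold over sentences is the fold over the flattened tag list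
theorem pvNested (ts : List (List (String × String))) (init : PySem.Dict String Int × Int) :
    ts.foldl (fun st sent => sent.foldl (fun st token => pvStep st token.2) st) init
      = (ts.flatMap (fun sent => sent.map (fun token => token.2))).foldl pvStep init := by
  induction ts generalizing init with
  | nil => rfl
  | cons sent ts ih => simp [List.foldl_append, ih, List.foldl_map]

theorem pvOfList_eq (tags : List String) (h : tags.Nodup) :
    PySem.Dict.ofList ((PySem.List.enumerate tags 0).map (fun p => (p.2, p.1))) = pvIdxDict tags := by
  apply PySem.Dict.ext
  show (List.foldl (fun d (a : String × Int) => d.insert a.1 a.2) PySem.Dict.empty _).items = _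
  rw [PySem.Dict.items_foldl_insert_fresh]
  · simp [pvIdxDict, PySem.Dict.empty, Function.comp_def]
  · simp [PySem.Dict.contains_empty]
  · simpa [List.map_map, Function.comp_def, PySem.List.map_snd_enumerate] using h

theorem pvNested' (ts : List (List (String × String))) :
    ts.foldl
      (fun (st : PySem.Dict String Int × Int) train_sent =>
        train_sent.foldl (fun st (token : String × String) =>
          if st.1.contains token.2 then st else (st.1.insert token.2 st.2, st.2 + 1)) st)
      (PySem.Dict.empty, 0)
      = (pvIdxDict (PySem.Set.ofList (ts.flatMap (fun sent => sent.map (fun token => token.2)))),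
         (((PySem.Set.ofList (ts.flatMap (fun sent => sent.map (fun token => token.2))) : List String).length : Int))) := by
  have hfun : (fun (st : PySem.Dict String Int × Int) (train_sent : List (String × String)) =>
        train_sent.foldl (fun st (token : String × String) =>
          if st.1.contains token.2 then st else (st.1.insert token.2 st.2, st.2 + 1)) st)
      = (fun st sent => sent.foldl (fun st token => pvStep st token.2) st) := rfl
  have hA : (PySem.Dict.empty, (0 : Int)) = (pvIdxDict [], (([] : List String).length : Int)) := by
    simp [pvIdxDict, PySem.Dict.empty, PySem.List.enumerate]
  rw [hfun, hA, pvNested, pvLoop]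
  rfl

-- ===== VERDICT (by name: the statement is the Claim_ definition above) =====
theorem build_tag_to_idx_dict_spec : Claim_equal_build_tag_to_idx_dict := by
  intro ts _
  show build_tag_to_idx_dict ts = build_tag_to_idx_dict_alt ts
  unfold build_tag_to_idx_dict build_tag_to_idx_dict_alt
  simp only []
  rw [pvNested']
  have hs := pvSorted_eq (ts.flatMap (fun sent => sent.map (fun token => token.2)))
  simp only [pvIdx] at hs
  rw [hs, pvOfList_eq _ (PySem.Set.nodup_ofList _)]
  congr 2
  simp [pvIdxDict, PySem.Dict.size, PySem.List.length_enumerate]
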